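-- pv_equiv track=rewrite | github.com/wpdavenport/brew_assistant | tools/render_recipe_html.py | subsection_items
-- ===== SOURCE A (Python) =====
-- def subsection_items(lines: list[str], target_title: str) -> list[str]:
--     current = ""
--     items: list[str] = []
--     for raw in lines:
--         stripped = raw.strip()
--         if stripped.startswith("### "):
--             current = stripped[4:].strip()
--             continue
--         if stripped.startswith("- ") and current.lower() == target_title.lower():
--             items.append(stripped[2:].strip())
--     return items
-- ===== SOURCE B (Python) =====
-- def subsection_items(lines: list[str], target_title: str) -> list[str]:
--     # Staged pipeline: strip, annotate each line with its governing title, filter.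
--     stripped = [raw.strip() for raw in lines]
--     titles = []
--     cur = ""
--     for s in stripped:
--         if s.startswith("### "):
--             cur = s[4:].strip()
--         titles.append(cur)
--     tgt = target_title.lower()
--     return [s[2:].strip()
--             for s, t in zip(stripped, titles)
--             if not s.startswith("### ") and s.startswith("- ") and t.lower() == tgt]
-- ===== Notes on version B (the rewrite author's own statement) =====
-- stated objective: alternative
-- what changed: B replaces A's fused stateful loop with a staged pipeline: strip every line, annotate each line with its governing section title via a prefix scan, then select matching list items with one comprehension.
import Mathlib
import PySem

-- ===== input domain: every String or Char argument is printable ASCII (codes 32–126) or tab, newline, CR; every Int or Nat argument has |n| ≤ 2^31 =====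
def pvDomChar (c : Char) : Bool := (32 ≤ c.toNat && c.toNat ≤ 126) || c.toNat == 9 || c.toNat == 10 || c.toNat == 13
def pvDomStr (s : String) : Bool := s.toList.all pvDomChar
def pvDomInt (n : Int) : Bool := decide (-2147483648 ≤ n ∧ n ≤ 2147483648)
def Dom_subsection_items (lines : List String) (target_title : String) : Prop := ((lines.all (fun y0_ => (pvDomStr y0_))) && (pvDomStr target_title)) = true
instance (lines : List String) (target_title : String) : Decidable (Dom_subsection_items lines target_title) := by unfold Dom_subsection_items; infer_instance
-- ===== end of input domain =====

-- B replaces A's fused stateful loop with a staged pipeline (strip, title prefix-scan, filter); same cost, different decomposition.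

-- ===== PORT A =====
-- A's single loop over `lines` with state (current, items).
def subsectionItemsLoopA (target_title : String) : List String → String → List String → List String
  | [], _, items => items
  | raw :: rest, current, items =>
    let stripped := PySem.Str.strip raw
    if PySem.Str.startswith stripped "### " then
      subsectionItemsLoopA target_title rest (PySem.Str.strip (PySem.Str.slice stripped (some 4) none)) items
    else if PySem.Str.startswith stripped "- " &&
            (PySem.Str.lower current == PySem.Str.lower target_title) then
      subsectionItemsLoopA target_title rest current
        (items ++ [PySem.Str.strip (PySem.Str.slice stripped (some 2) none)])
    else
      subsectionItemsLoopA target_title rest current items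

def subsection_items (lines : List String) (target_title : String) : List String :=
  subsectionItemsLoopA target_title lines "" []

-- ===== PORT B =====
-- B's title prefix-scan: each stripped line paired with its governing section title.
def titleScan : List String → String → List String
  | [], _ => []
  | s :: rest, cur =>
    let cur' := if PySem.Str.startswith s "### " then PySem.Str.strip (PySem.Str.slice s (some 4) none) else cur
    cur' :: titleScan rest cur'

def subsection_items_alt (lines : List String) (target_title : String) : List String :=
  let stripped := lines.map PySem.Str.strip
  let titles := titleScan stripped ""
  let tgt := PySem.Str.lower target_title
  (stripped.zip titles).filterMap (fun st =>
    if !PySem.Str.startswith st.1 "### " && PySem.Str.startswith st.1 "- " &&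
       (PySem.Str.lower st.2 == tgt) then
      some (PySem.Str.strip (PySem.Str.slice st.1 (some 2) none))
    else none)

-- ===== PRECONDITION & SPEC =====
def Spec_subsection_items (lines : List String) (target_title : String) (out : List String) : Prop := out = subsection_items_alt lines target_title
instance (lines : List String) (target_title : String) (out : List String) : Decidable (Spec_subsection_items lines target_title out) := by unfold Spec_subsection_items; infer_instance

-- ===== CLAIM (what is proved, stated in full; the proofs are below) =====
def Claim_equal_subsection_items : Prop := ∀ (lines : List String) (target_title : String), Dom_subsection_items lines target_title → Spec_subsection_items lines target_title (subsection_items lines target_title)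

-- ===== LEMMAS AND PROOFS =====

-- A's loop equals its accumulator followed by B's filtered zip of the remaining stripped lines.
theorem subsectionItems_inv (target_title : String) :
    ∀ (ls : List String) (cur : String) (items : List String),
      subsectionItemsLoopA target_title ls cur items =
        items ++ (((ls.map PySem.Str.strip).zip (titleScan (ls.map PySem.Str.strip) cur)).filterMap
          (fun st =>
            if !PySem.Str.startswith st.1 "### " && PySem.Str.startswith st.1 "- " &&
               (PySem.Str.lower st.2 == PySem.Str.lower target_title) then
              some (PySem.Str.strip (PySem.Str.slice st.1 (some 2) none))
            else none)) := by
  intro ls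
  induction ls with
  | nil => intro cur items; simp [subsectionItemsLoopA, titleScan]
  | cons raw rest ih =>
    intro cur items
    simp only [subsectionItemsLoopA, titleScan, List.map_cons, List.zip_cons_cons,
      List.filterMap_cons]
    split_ifs with h1 h2 h3 h4 h5 <;>
      first
        | (exact ih _ _)
        | simp_all

-- ===== VERDICT (by name: the statement is the Claim_ definition above) =====
theorem subsection_items_spec : Claim_equal_subsection_items := by
  intro lines target_title _
  unfold Spec_subsection_items subsection_items subsection_items_alt
  simpa using subsectionItems_inv target_title lines "" []
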